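-- pv_equiv track=rewrite | github.com/IdoShimshi/AIvy_solver | scripts/build_benchmarks_from_ivybench.py | _paren_balance
-- ===== SOURCE A (Python) =====
-- def _paren_balance(text: str) -> int:
--     depth = 0
--     for ch in text:
--         if ch == "(":
--             depth += 1
--         elif ch == ")":
--             depth -= 1
--     return depth
-- ===== SOURCE B (Python) =====
-- def _paren_balance(text: str) -> int:
--     return text.count("(") - text.count(")")
-- ===== Notes on version B (the rewrite author's own statement) =====
-- stated objective: idiomatic
-- what changed: Replaces the single interleaved accumulator loop with branches by two independent str.count aggregate scans whose difference is the balance.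
import Mathlib
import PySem

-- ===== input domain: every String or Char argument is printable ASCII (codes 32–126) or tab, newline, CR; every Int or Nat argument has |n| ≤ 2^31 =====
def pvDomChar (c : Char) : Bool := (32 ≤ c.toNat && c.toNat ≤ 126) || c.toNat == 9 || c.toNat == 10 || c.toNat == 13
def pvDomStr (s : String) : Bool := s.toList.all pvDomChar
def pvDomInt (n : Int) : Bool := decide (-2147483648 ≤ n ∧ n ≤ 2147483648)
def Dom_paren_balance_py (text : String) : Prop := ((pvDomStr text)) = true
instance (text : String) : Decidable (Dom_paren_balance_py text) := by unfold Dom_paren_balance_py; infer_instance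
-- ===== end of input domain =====

-- B replaces A's single branching accumulator loop by the difference of two str.count aggregates (idiomatic).

-- ===== PORT A =====
def paren_balance_py (text : String) : Int :=
  text.toList.foldl
    (fun depth ch =>
      if ch == '(' then depth + 1
      else if ch == ')' then depth - 1
      else depth) 0

-- ===== PORT B =====
def paren_balance_py_alt (text : String) : Int :=
  (PySem.Str.count text "(" : Int) - (PySem.Str.count text ")" : Int)

-- ===== PRECONDITION & SPEC =====
def Spec_paren_balance_py (text : String) (out : Int) : Prop := out = paren_balance_py_alt text
instance (text : String) (out : Int) : Decidable (Spec_paren_balance_py text out) := by unfold Spec_paren_balance_py; infer_instance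

-- ===== CLAIM (what is proved, stated in full; the proofs are below) =====
def Claim_equal_paren_balance_py : Prop := ∀ (text : String), Dom_paren_balance_py text → Spec_paren_balance_py text (paren_balance_py text)

-- ===== LEMMAS AND PROOFS =====

theorem count_go_singleton (c : Char) (l : List Char) (fuel : Nat) (acc : Nat)
    (h : l.length ≤ fuel) :
    PySem.Chars.count.go [c] fuel l acc = acc + l.count c := by
  induction l generalizing fuel acc with
  | nil => cases fuel <;> simp [PySem.Chars.count.go]
  | cons x t ih =>
    cases fuel with
    | zero => simp at h
    | succ n =>
      simp only [List.length_cons, Nat.succ_le_succ_iff] at h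
      rw [PySem.Chars.count.go]
      by_cases hx : x = c
      · subst hx
        simp [List.isPrefixOf, ih _ _ h]
        omega
      · have : List.isPrefixOf [c] (x :: t) = false := by
          simp [List.isPrefixOf]; exact fun hc => (hx hc.symm).elim
        simp [this, ih _ _ h, hx]

theorem str_count_char (s : String) (c : Char) (t : String) (ht : t.toList = [c]) :
    PySem.Str.count s t = s.toList.count c := by
  rw [PySem.Str.count_eq, ht, PySem.Chars.count]
  simp only [List.isEmpty_cons, if_false, Bool.false_eq_true]
  rw [count_go_singleton c s.toList s.toList.length 0 le_rfl]
  simp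

theorem foldl_balance (l : List Char) (a : Int) :
    l.foldl
      (fun depth ch =>
        if ch == '(' then depth + 1
        else if ch == ')' then depth - 1
        else depth) a
      = a + (l.count '(' : Int) - (l.count ')' : Int) := by
  induction l generalizing a with
  | nil => simp
  | cons x t ih =>
    simp only [List.foldl_cons, ih, List.count_cons]
    by_cases h1 : x = '('
    · simp [h1]; ring
    · by_cases h2 : x = ')'
      · simp [h2]; ring
      · simp [h1, h2]

-- ===== VERDICT (by name: the statement is the Claim_ definition above) =====
theorem paren_balance_py_spec : Claim_equal_paren_balance_py := by
  intro text _
  show paren_balance_py text = paren_balance_py_alt text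
  unfold paren_balance_py paren_balance_py_alt
  rw [foldl_balance]
  rw [str_count_char text '(' "(" (by decide), str_count_char text ')' ")" (by decide)]
  ring
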